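-- pv_equiv track=rewrite | github.com/pooriyasafaei/B.S.Projects | AI/Serie1/Q2/main.py | go_to_next
-- ===== SOURCE A (Python) =====
-- def go_to_next(number, alphabet_length):
--     idx = len(number) - 1
--     while idx >= 0:
--         if number[idx] < alphabet_length - 1:
--             number[idx] += 1
--             return True
--         else:
--             number[idx] = 0
--             idx -= 1
--     return False
-- ===== SOURCE B (Python) =====
-- def go_to_next(number, alphabet_length):
--     # Full-pass carry fold: rebuild the digit vector back-to-front with a carry
--     # flag, then write it back in one shot; succeeded iff the carry was absorbed.
--     out = []
--     carry = True
--     for d in reversed(number):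
--         if carry and d < alphabet_length - 1:
--             out.append(d + 1)
--             carry = False
--         elif carry:
--             out.append(0)
--         else:
--             out.append(d)
--     out.reverse()
--     number[:] = out
--     return not carry
-- ===== Notes on version B (the rewrite author's own statement) =====
-- stated objective: alternative
-- what changed: Replaced A's early-exit in-place right-to-left search loop by a full-pass fold that rebuilds the whole digit vector with a boolean carry accumulator and writes it back in one bulk assignment, returning the negated final carry; same side effects, return value only is proved in Lean.
import Mathlib
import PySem

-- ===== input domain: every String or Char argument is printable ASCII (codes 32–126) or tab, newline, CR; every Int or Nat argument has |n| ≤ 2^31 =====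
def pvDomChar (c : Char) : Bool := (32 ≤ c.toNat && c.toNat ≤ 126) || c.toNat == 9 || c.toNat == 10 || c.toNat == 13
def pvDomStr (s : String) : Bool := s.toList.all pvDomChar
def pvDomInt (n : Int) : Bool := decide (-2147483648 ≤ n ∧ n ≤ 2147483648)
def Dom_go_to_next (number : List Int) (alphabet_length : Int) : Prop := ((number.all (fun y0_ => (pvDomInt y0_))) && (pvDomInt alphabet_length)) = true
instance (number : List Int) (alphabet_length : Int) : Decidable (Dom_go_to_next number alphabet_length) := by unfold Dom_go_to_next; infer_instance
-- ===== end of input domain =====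

-- B rebuilds the whole digit vector in a single carry-flag fold instead of A's
-- early-exit in-place search loop (alternative decomposition, same cost).  Both
-- Pythons mutate `number` in place identically; Lean proves equality of the
-- RETURN value only.

-- ===== PORT A =====
-- A's while loop over idx = len-1, len-2, …: fuel = idx+1; when fuel = i+1 the loop
-- body reads number[i].  The index is always 0 ≤ i < len, so pyGetD with default 0 is
-- exact; the mutations number[idx] += 1 / = 0 never affect a later read (reads move
-- left), so they are dropped from this return-value port.
def go_to_next_loopA (number : List Int) (alphabet_length : Int) : Nat → Bool
  | 0 => false
  | Nat.succ i =>
      if PySem.List.pyGetD number (i : Int) 0 < alphabet_length - 1 then true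
      else go_to_next_loopA number alphabet_length i

def go_to_next (number : List Int) (alphabet_length : Int) : Bool :=
  go_to_next_loopA number alphabet_length number.length

-- ===== PORT B =====
-- B: fold over reversed(number) with state (out, carry); each step appends one digit
-- to out (d+1 absorbing the carry, 0 propagating it, or d unchanged); finally
-- number[:] = out (a mutation, dropped here) and `not carry` is returned.
def go_to_next_altStep (alphabet_length : Int) (st : List Int × Bool) (d : Int) :
    List Int × Bool :=
  if st.2 && decide (d < alphabet_length - 1) then (st.1 ++ [d + 1], false)
  else if st.2 then (st.1 ++ [0], true)
  else (st.1 ++ [d], st.2)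

def go_to_next_alt (number : List Int) (alphabet_length : Int) : Bool :=
  let st := number.reverse.foldl (go_to_next_altStep alphabet_length) ([], true)
  !st.2

-- ===== PRECONDITION & SPEC =====
def Spec_go_to_next (number : List Int) (alphabet_length : Int) (out : Bool) : Prop := out = go_to_next_alt number alphabet_length
instance (number : List Int) (alphabet_length : Int) (out : Bool) : Decidable (Spec_go_to_next number alphabet_length out) := by unfold Spec_go_to_next; infer_instance

-- ===== CLAIM (what is proved, stated in full; the proofs are below) =====
def Claim_equal_go_to_next : Prop := ∀ (number : List Int) (alphabet_length : Int), Dom_go_to_next number alphabet_length → Spec_go_to_next number alphabet_length (go_to_next number alphabet_length)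

-- ===== LEMMAS AND PROOFS =====

-- A's countdown loop with fuel n returns true iff some index below n holds a digit < al-1.
theorem go_to_next_loopA_iff (number : List Int) (al : Int) (n : Nat) :
    go_to_next_loopA number al n = true ↔
      ∃ i, i < n ∧ number.getD i 0 < al - 1 := by
  induction n with
  | zero => simp [go_to_next_loopA]
  | succ i ih =>
      have hstep : go_to_next_loopA number al (i + 1)
          = if number.getD i 0 < al - 1 then true else go_to_next_loopA number al i := by
        simp [go_to_next_loopA]
      rw [hstep]
      by_cases h : number.getD i 0 < al - 1
      · rw [if_pos h]
        exact iff_of_true rfl ⟨i, Nat.lt_succ_self i, h⟩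
      · rw [if_neg h, ih]
        constructor
        · rintro ⟨j, hj, hd⟩; exact ⟨j, by omega, hd⟩
        · rintro ⟨j, hj, hd⟩
          refine ⟨j, ?_, hd⟩
          rcases Nat.lt_succ_iff_lt_or_eq.mp hj with h' | h'
          · exact h'
          · subst h'; exact absurd hd h

-- How one step of B's fold acts, by carry and by the comparison:
theorem go_to_next_altStep_false (al : Int) (out : List Int) (d : Int) :
    go_to_next_altStep al (out, false) d = (out ++ [d], false) := rfl

theorem go_to_next_altStep_true_lt (al : Int) (out : List Int) (d : Int)
    (h : d < al - 1) : go_to_next_altStep al (out, true) d = (out ++ [d + 1], false) := by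
  simp [go_to_next_altStep, h]

theorem go_to_next_altStep_true_ge (al : Int) (out : List Int) (d : Int)
    (h : ¬ d < al - 1) : go_to_next_altStep al (out, true) d = (out ++ [0], true) := by
  simp [go_to_next_altStep, h]

-- The carry component of B's fold: starting from carry c, the final carry is
-- c && "every digit of l is ≥ al-1" (independent of the accumulated out-list).
theorem go_to_next_fold_carry (al : Int) (l : List Int) :
    ∀ (out : List Int) (c : Bool),
      (l.foldl (go_to_next_altStep al) (out, c)).2
        = (c && l.all (fun d => !decide (d < al - 1))) := by
  induction l with
  | nil => intro out c; simp
  | cons d t ih =>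
      intro out c
      rw [List.foldl_cons]
      cases c with
      | false => rw [go_to_next_altStep_false, ih]; simp
      | true =>
          by_cases h : d < al - 1
          · rw [go_to_next_altStep_true_lt al out d h, ih]; simp [h]
          · rw [go_to_next_altStep_true_ge al out d h, ih]; simp [h]

-- ===== VERDICT (by name: the statement is the Claim_ definition above) =====
theorem go_to_next_spec : Claim_equal_go_to_next := by
  intro number al _
  unfold Spec_go_to_next go_to_next
  simp only [go_to_next_alt, go_to_next_fold_carry]
  rw [Bool.eq_iff_iff]
  rw [go_to_next_loopA_iff]
  simp only [Bool.true_and, Bool.not_eq_eq_eq_not, Bool.not_true, List.all_eq_false,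
    List.mem_reverse, Bool.not_eq_false, decide_eq_true_eq]
  constructor
  · rintro ⟨i, hi, hd⟩
    exact ⟨number.getD i 0, by rw [List.getD_eq_getElem _ _ hi]; exact List.getElem_mem hi, hd⟩
  · rintro ⟨d, hd, hlt⟩
    obtain ⟨i, hi, rfl⟩ := List.mem_iff_getElem.mp hd
    exact ⟨i, hi, by rw [List.getD_eq_getElem _ _ hi]; exact hlt⟩
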